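-- pv_equiv track=rewrite | github.com/hsn8086/exam | nowcoder/2025牛客暑期多校训练营2/Love_Wins_All2.py | solve
-- ===== SOURCE A (Python) =====
-- MOD = 998244353
--
-- def modpow(a, b):
--     res = 1
--     while b:
--         if b & 1:
--             res = res * a % MOD
--         a = a * a % MOD
--         b >>= 1
--     return res
--
-- def solve(n, a):
--     vis = [False] * (n + 1)
--     odd_lens, even_lens = [], []
--
--     for i in range(1, n + 1):
--         if not vis[i]:
--             u = i
--             cnt = 0
--             while not vis[u]:
--                 vis[u] = True
--                 u = a[u]
--                 cnt += 1
--             if cnt % 2 == 1: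
--                 odd_lens.append(cnt)
--             else:
--                 even_lens.append(cnt)
--
--     me = len(even_lens)
--     mo = len(odd_lens)
--     pow2_me = modpow(2, me)
--
--     ans = 0
--
--     # 情况1：两个未婚在同一个偶环，其他环要能匹配完（即没有奇环）
--     if mo == 0:
--         sum_f2 = 0
--         for L in even_lens:
--             term = (L // 4) * L
--             if L % 4 == 2:
--                 term += L // 2
--             sum_f2 = (sum_f2 + term) % MOD
--         coef = pow2_me * modpow(2, MOD - 2) % MOD
--         ans = (ans + coef * sum_f2) % MOD
--
--     # 情况2：两个未婚分别来自两个不同奇环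
--     if mo == 2:
--         L1, L2 = odd_lens
--         term = L1 * L2 % MOD
--         term = term * pow2_me % MOD
--         ans = (ans + term) % MOD
--
--     return ans
-- ===== SOURCE B (Python) =====
-- MOD = 998244353
--
-- def modpow(a, b):
--     res = 1
--     while b:
--         if b & 1:
--             res = res * a % MOD
--         a = a * a % MOD
--         b >>= 1
--     return res
--
-- def solve(n, a):
--     # stateless cycle enumeration: walk the full cycle from every index and
--     # keep its length only when the start index is the cycle's minimum
--     odd_lens, even_lens = [], []
--     for i in range(1, n + 1):
--         u, cnt, mn = a[i], 1, i
--         while u != i: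
--             if u < mn:
--                 mn = u
--             u = a[u]
--             cnt += 1
--         if mn == i:
--             (odd_lens if cnt % 2 == 1 else even_lens).append(cnt)
--
--     me = len(even_lens)
--     mo = len(odd_lens)
--     inv2 = modpow(2, MOD - 2)
--     pow2_me = modpow(2, me)
--
--     if mo == 2:
--         return odd_lens[0] * odd_lens[1] % MOD * pow2_me % MOD
--     if mo != 0:
--         return 0
--     sum_f2 = sum(L // 4 * L + (L // 2 if L % 4 == 2 else 0) for L in even_lens) % MOD
--     return pow2_me * inv2 % MOD * sum_f2 % MOD
-- ===== Notes on version B (the rewrite author's own statement) =====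
-- stated objective: alternative
-- what changed: The shared visited-array sweep that peels each cycle once is replaced by a stateless per-index walk that traverses the whole cycle from every index, keeping its length only when the start index is the cycle's minimum, and the modular tail is restructured into early returns with a single summed-then-reduced sum.
-- outside the precondition, e.g. on solve(2, [0, 2, 2]): A returns 1, B does not finish within the time limit
import Mathlib
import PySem

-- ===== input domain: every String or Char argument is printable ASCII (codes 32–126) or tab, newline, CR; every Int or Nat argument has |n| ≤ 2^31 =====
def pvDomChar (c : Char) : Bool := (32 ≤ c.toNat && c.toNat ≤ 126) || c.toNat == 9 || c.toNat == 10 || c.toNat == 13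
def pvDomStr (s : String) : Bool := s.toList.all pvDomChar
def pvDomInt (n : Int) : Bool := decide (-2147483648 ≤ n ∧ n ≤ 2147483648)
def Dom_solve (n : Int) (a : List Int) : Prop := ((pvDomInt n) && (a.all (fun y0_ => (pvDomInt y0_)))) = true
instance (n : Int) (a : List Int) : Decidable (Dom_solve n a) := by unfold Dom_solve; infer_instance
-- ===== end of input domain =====

-- B replaces A's visited-array cycle sweep by a stateless minimal-representative
-- whole-cycle walk from every index (alternative decomposition, not faster).
-- Equivalence is about the RETURN value (neither Python mutates its arguments).

def MOD : Int := 998244353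

-- shared helper `modpow` (identical in both Python files); the 0 < b guard is a
-- termination guard only (Python loops forever on negative b; never called so)
def modpowGo (a b res : Int) : Int :=
  if 0 < b then
    modpowGo (PySem.Int.mod (a * a) MOD) (PySem.Int.floordiv b 2)
      (if PySem.Int.band b 1 = 1 then PySem.Int.mod (res * a) MOD else res)
  else res
termination_by b.toNat
decreasing_by
  rw [PySem.Int.floordiv_eq_ediv_of_pos (by norm_num)]; omega

def modpow (a b : Int) : Int := modpowGo a b 1

-- ===== PORT A =====
-- inner `while not vis[u]` loop; fuel is a termination guard (each step marks a
-- new index, so n.toNat+1 steps suffice on the inputs Pre_ admits); the pyGetD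
-- defaults are never used inside Pre_ (indices stay in range there)
def walkA (a : List Int) : Nat → List Bool → Int → Int → List Bool × Int
  | 0, vis, _, cnt => (vis, cnt)
  | fuel + 1, vis, u, cnt =>
    match PySem.List.pyGet? vis u with
    | some false =>
        walkA a fuel (PySem.List.pySetD vis u true) (PySem.List.pyGetD a u 0) (cnt + 1)
    | _ => (vis, cnt)

def stepA (a : List Int) (fuel : Nat) (st : List Bool × List Int × List Int) (i : Int) :
    List Bool × List Int × List Int :=
  match PySem.List.pyGet? st.1 i with
  | some false =>
      let r := walkA a fuel st.1 i 0
      if PySem.Int.mod r.2 2 = 1 then (r.1, st.2.1 ++ [r.2], st.2.2)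
      else (r.1, st.2.1, st.2.2 ++ [r.2])
  | _ => st

def finishA (odd_lens even_lens : List Int) : Int :=
  let me_ := PySem.List.len even_lens
  let mo := PySem.List.len odd_lens
  let pow2me := modpow 2 me_
  let ans : Int := 0
  let ans := if mo = 0 then
      let sumf2 := even_lens.foldl
        (fun s L => PySem.Int.mod
          (s + (PySem.Int.floordiv L 4 * L +
                (if PySem.Int.mod L 4 = 2 then PySem.Int.floordiv L 2 else 0))) MOD) 0
      let coef := PySem.Int.mod (pow2me * modpow 2 (MOD - 2)) MOD
      PySem.Int.mod (ans + coef * sumf2) MOD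
    else ans
  let ans := if mo = 2 then
      let L1 := PySem.List.pyGetD odd_lens 0 0
      let L2 := PySem.List.pyGetD odd_lens 1 0
      let term := PySem.Int.mod (L1 * L2) MOD
      let term := PySem.Int.mod (term * pow2me) MOD
      PySem.Int.mod (ans + term) MOD
    else ans
  ans

def solve (n : Int) (a : List Int) : Int :=
  let st := (PySem.List.pyRange 1 (n + 1) 1).foldl (stepA a (n.toNat + 1))
      (List.replicate (n + 1).toNat false, ([], []))
  finishA st.2.1 st.2.2

-- ===== PORT B =====
-- whole-cycle walk from i (u starts at a[i]); fuel is a termination guard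
-- (`while u != i` returns after the cycle length ≤ n steps inside Pre_)
def walkB (a : List Int) : Nat → Int → Int → Int → Int → Option (Int × Int)
  | 0, _, _, _, _ => none
  | fuel + 1, i, u, cnt, mn =>
    if u = i then some (cnt, mn)
    else walkB a fuel i (PySem.List.pyGetD a u 0) (cnt + 1) (if u < mn then u else mn)

def stepB (a : List Int) (fuel : Nat) (st : List Int × List Int) (i : Int) :
    List Int × List Int :=
  match walkB a fuel i (PySem.List.pyGetD a i 0) 1 i with
  | none => st
  | some (cnt, mn) =>
      if mn = i then
        if PySem.Int.mod cnt 2 = 1 then (st.1 ++ [cnt], st.2) else (st.1, st.2 ++ [cnt])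
      else st

def finishB (odd_lens even_lens : List Int) : Int :=
  let me_ := PySem.List.len even_lens
  let mo := PySem.List.len odd_lens
  let inv2 := modpow 2 (MOD - 2)
  let pow2me := modpow 2 me_
  if mo = 2 then
    PySem.Int.mod
      (PySem.Int.mod (PySem.List.pyGetD odd_lens 0 0 * PySem.List.pyGetD odd_lens 1 0) MOD
        * pow2me) MOD
  else if mo ≠ 0 then 0
  else
    let sumf2 := PySem.Int.mod
      ((even_lens.map (fun L => PySem.Int.floordiv L 4 * L +
          (if PySem.Int.mod L 4 = 2 then PySem.Int.floordiv L 2 else 0))).sum) MOD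
    PySem.Int.mod (PySem.Int.mod (pow2me * inv2) MOD * sumf2) MOD

def solve_alt (n : Int) (a : List Int) : Int :=
  let st := (PySem.List.pyRange 1 (n + 1) 1).foldl (stepB a (n.toNat + 1)) ([], [])
  finishB st.1 st.2

-- ===== PRECONDITION & SPEC =====
-- Pre_ is the task's natural domain: either n ≤ 0 (both loops are empty and the
-- answer is 0 without reading a) or a[1..n] is a permutation of 1..n (with a dummy
-- a[0]); for n ≥ 1 with a non-permutation A raises IndexError or returns accidental
-- rho-walk segment counts, and B's whole-cycle walk need not terminate.
def PermPre (n : Int) (a : List Int) : Prop :=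
  0 ≤ n ∧ a.length = n.toNat + 1 ∧ (∀ x ∈ a.drop 1, 1 ≤ x ∧ x ≤ n) ∧ (a.drop 1).Nodup

def Pre_solve (n : Int) (a : List Int) : Prop := n ≤ 0 ∨ PermPre n a

instance (n : Int) (a : List Int) : Decidable (Pre_solve n a) := by
  unfold Pre_solve PermPre; infer_instance

def pvWitness_solve : Int × List Int := (5, [0, 2, 3, 1, 5, 4])

def Spec_solve (n : Int) (a : List Int) (out : Int) : Prop := out = solve_alt n a
instance (n : Int) (a : List Int) (out : Int) : Decidable (Spec_solve n a out) := by
  unfold Spec_solve; infer_instance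

-- ===== CLAIM (what is proved, stated in full; the proofs are below) =====
def Claim_equal_solve : Prop :=
  ∀ (n : Int) (a : List Int), Dom_solve n a → Pre_solve n a → Spec_solve n a (solve n a)

-- ===== LEMMAS AND PROOFS =====

-- proof-layer helpers (used only by the lemmas and the verdict below)

def fA (a : List Int) (u : Int) : Int := PySem.List.pyGetD a u 0

def it (a : List Int) (k : Nat) (i : Int) : Int := (fA a)^[k] i

noncomputable def per (a : List Int) (i : Int) : Nat := Function.minimalPeriod (fA a) i

noncomputable def orbitF (a : List Int) (i : Int) : Finset Int :=
  (Finset.range (per a i)).image (fun k => it a k i)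

noncomputable def Vm (a : List Int) (m : Int) : Finset Int :=
  (Finset.Icc 1 (m - 1)).biUnion (orbitF a)

noncomputable def stepC (a : List Int) (st : List Int × List Int) (i : Int) :
    List Int × List Int :=
  if (∀ k < per a i, i ≤ it a k i) then
    if PySem.Int.mod (per a i : Int) 2 = 1 then (st.1 ++ [(per a i : Int)], st.2)
    else (st.1, st.2 ++ [(per a i : Int)])
  else st

def VisRep (n : Int) (vis : List Bool) (V : Finset Int) : Prop :=
  vis.length = n.toNat + 1 ∧
    ∀ (j : Nat) (hj : j < vis.length), (vis[j] = true ↔ (j : Int) ∈ V)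

def pmin (a : List Int) (i : Int) : Nat → Int
  | 0 => i
  | k + 1 => if it a k i < pmin a i k then it a k i else pmin a i k

lemma it_zero (a : List Int) (i : Int) : it a 0 i = i := rfl

lemma it_succ (a : List Int) (k : Nat) (i : Int) : it a (k + 1) i = fA a (it a k i) :=
  Function.iterate_succ_apply' (fA a) k i

lemma it_add (a : List Int) (k l : Nat) (i : Int) : it a (k + l) i = it a k (it a l i) :=
  Function.iterate_add_apply (fA a) k l i

lemma fA_bound (n : Int) (a : List Int) (hP : PermPre n a) {u : Int}
    (h1 : 1 ≤ u) (h2 : u ≤ n) : 1 ≤ fA a u ∧ fA a u ≤ n := by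
  obtain ⟨hn, hlen, hmem, -⟩ := hP
  have hnn : (n.toNat : Int) = n := Int.toNat_of_nonneg hn
  have hlt : u < (a.length : Int) := by rw [hlen]; push_cast; omega
  have h0 : (0:Int) ≤ u := by omega
  have hu1 : 1 ≤ u.toNat := by omega
  have hul : u.toNat < a.length := by omega
  have he : fA a u = a[u.toNat] := by
    unfold fA; rw [PySem.List.pyGetD_eq_getElem a 0 h0 hlt]
  have hd : u.toNat - 1 < (a.drop 1).length := by
    simp only [List.length_drop]; omega
  have hx : a[u.toNat] ∈ a.drop 1 := by
    have : (a.drop 1)[u.toNat - 1] = a[u.toNat] := by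
      rw [List.getElem_drop]; congr 1; omega
    rw [← this]; exact List.getElem_mem hd
  rw [he]; exact hmem _ hx

lemma fA_inj (n : Int) (a : List Int) (hP : PermPre n a) {u v : Int}
    (hu : 1 ≤ u ∧ u ≤ n) (hv : 1 ≤ v ∧ v ≤ n) (he : fA a u = fA a v) : u = v := by
  obtain ⟨hn, hlen, hmem, hnd⟩ := hP
  have hnn : (n.toNat : Int) = n := Int.toNat_of_nonneg hn
  have hltu : u < (a.length : Int) := by rw [hlen]; push_cast; omega
  have hltv : v < (a.length : Int) := by rw [hlen]; push_cast; omega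
  have heu : fA a u = a[u.toNat]'(by omega) := by
    unfold fA; rw [PySem.List.pyGetD_eq_getElem a 0 (by omega) hltu]
  have hev : fA a v = a[v.toNat]'(by omega) := by
    unfold fA; rw [PySem.List.pyGetD_eq_getElem a 0 (by omega) hltv]
  have hdu : u.toNat - 1 < (a.drop 1).length := by simp only [List.length_drop]; omega
  have hdv : v.toNat - 1 < (a.drop 1).length := by simp only [List.length_drop]; omega
  have hgu : (a.drop 1)[u.toNat - 1] = a[u.toNat]'(by omega) := by
    rw [List.getElem_drop]; congr 1; omega
  have hgv : (a.drop 1)[v.toNat - 1] = a[v.toNat]'(by omega) := by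
    rw [List.getElem_drop]; congr 1; omega
  have : (a.drop 1)[u.toNat - 1] = (a.drop 1)[v.toNat - 1] := by
    rw [hgu, hgv, ← heu, ← hev, he]
  have := (List.Nodup.getElem_inj_iff hnd).mp this
  omega

lemma it_bound (n : Int) (a : List Int) (hP : PermPre n a) {i : Int}
    (hi : 1 ≤ i ∧ i ≤ n) (k : Nat) : 1 ≤ it a k i ∧ it a k i ≤ n := by
  induction k with
  | zero => exact hi
  | succ k ih => rw [it_succ]; exact fA_bound n a hP ih.1 ih.2

lemma it_cancel (n : Int) (a : List Int) (hP : PermPre n a) :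
    ∀ (k : Nat) {x y : Int}, 1 ≤ x ∧ x ≤ n → 1 ≤ y ∧ y ≤ n →
      it a k x = it a k y → x = y := by
  intro k
  induction k with
  | zero => intro x y _ _ h; exact h
  | succ k ih =>
      intro x y hx hy h
      rw [it_succ, it_succ] at h
      exact ih hx hy
        (fA_inj n a hP (it_bound n a hP hx k) (it_bound n a hP hy k) h)

lemma it_periodic (n : Int) (a : List Int) (hP : PermPre n a) {i : Int}
    (hi : 1 ≤ i ∧ i ≤ n) : ∃ p : Nat, 0 < p ∧ p ≤ n.toNat ∧ it a p i = i := by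
  have hmaps : ∀ k ∈ Finset.range (n.toNat + 1), it a k i ∈ Finset.Icc (1:Int) n := by
    intro k _
    have := it_bound n a hP hi k
    simp only [Finset.mem_Icc]; exact this
  have hcard : (Finset.Icc (1:Int) n).card < (Finset.range (n.toNat + 1)).card := by
    rw [Int.card_Icc, Finset.card_range]; omega
  obtain ⟨x, hx, y, hy, hne, heq⟩ :=
    Finset.exists_ne_map_eq_of_card_lt_of_maps_to hcard hmaps
  simp only [Finset.mem_range] at hx hy
  rcases Nat.lt_or_ge x y with hlt | hge
  · refine ⟨y - x, by omega, by omega, ?_⟩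
    have : it a x (it a (y - x) i) = it a x i := by
      rw [← it_add]; rw [show x + (y - x) = y by omega]; exact heq.symm
    exact it_cancel n a hP x (it_bound n a hP hi _) hi this
  · have hlt : y < x := by omega
    refine ⟨x - y, by omega, by omega, ?_⟩
    have : it a y (it a (x - y) i) = it a y i := by
      rw [← it_add]; rw [show y + (x - y) = x by omega]; exact heq
    exact it_cancel n a hP y (it_bound n a hP hi _) hi this

lemma mem_periodicPts (n : Int) (a : List Int) (hP : PermPre n a) {i : Int}
    (hi : 1 ≤ i ∧ i ≤ n) : i ∈ Function.periodicPts (fA a) := by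
  obtain ⟨p, hp, -, hit⟩ := it_periodic n a hP hi
  exact ⟨p, hp, hit⟩

lemma per_pos (n : Int) (a : List Int) (hP : PermPre n a) {i : Int}
    (hi : 1 ≤ i ∧ i ≤ n) : 0 < per a i :=
  Function.minimalPeriod_pos_of_mem_periodicPts (mem_periodicPts n a hP hi)

lemma it_per (n : Int) (a : List Int) (_hP : PermPre n a) {i : Int}
    (_hi : 1 ≤ i ∧ i ≤ n) : it a (per a i) i = i :=
  Function.iterate_minimalPeriod

lemma per_le (n : Int) (a : List Int) (hP : PermPre n a) {i : Int}
    (hi : 1 ≤ i ∧ i ≤ n) : per a i ≤ n.toNat := by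
  obtain ⟨p, hp, hle, hit⟩ := it_periodic n a hP hi
  exact le_trans (Function.IsPeriodicPt.minimalPeriod_le hp hit) hle

lemma it_ne_of_lt_per (n : Int) (a : List Int) (_hP : PermPre n a) {i : Int}
    (_hi : 1 ≤ i ∧ i ≤ n) {k : Nat} (h0 : 0 < k) (hk : k < per a i) :
    it a k i ≠ i := fun h =>
  Function.not_isPeriodicPt_of_pos_of_lt_minimalPeriod (by omega) hk h

lemma it_inj_lt (n : Int) (a : List Int) (hP : PermPre n a) {i : Int}
    (hi : 1 ≤ i ∧ i ≤ n) {j k : Nat} (hjk : j < k) (hk : k < per a i) :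
    it a j i ≠ it a k i := by
  intro h
  have : it a j (it a (k - j) i) = it a j i := by
    rw [← it_add, show j + (k - j) = k by omega]; exact h.symm
  have heq : it a (k - j) i = i :=
    it_cancel n a hP j (it_bound n a hP hi _) hi this
  exact it_ne_of_lt_per n a hP hi (by omega) (by omega) heq

lemma it_mod (n : Int) (a : List Int) (_hP : PermPre n a) {i : Int}
    (_hi : 1 ≤ i ∧ i ≤ n) (m : Nat) : it a (m % per a i) i = it a m i :=
  Function.iterate_mod_minimalPeriod_eq

lemma per_it (n : Int) (a : List Int) (hP : PermPre n a) {i : Int}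
    (hi : 1 ≤ i ∧ i ≤ n) (k : Nat) : per a (it a k i) = per a i :=
  Function.minimalPeriod_apply_iterate (mem_periodicPts n a hP hi) k

lemma mem_orbit_iff (a : List Int) (i x : Int) :
    x ∈ orbitF a i ↔ ∃ k, k < per a i ∧ it a k i = x := by
  simp [orbitF]

lemma i_mem_orbit_it (n : Int) (a : List Int) (hP : PermPre n a) {i : Int}
    (hi : 1 ≤ i ∧ i ≤ n) (k : Nat) :
    ∃ l, l < per a i ∧ it a l (it a k i) = i := by
  have hp := per_pos n a hP hi
  set p := per a i with hpdef
  refine ⟨(p - k % p) % p, Nat.mod_lt _ hp, ?_⟩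
  rw [← it_add]
  have h1 : ((p - k % p) % p + k) % p = 0 := by
    have hk : k % p < p := Nat.mod_lt _ hp
    have : ((p - k % p) % p + k) % p = ((p - k % p) + k) % p := by
      rw [Nat.add_mod, Nat.mod_mod_of_dvd _ dvd_rfl, ← Nat.add_mod]
    rw [this]
    have h2 : (p - k % p) + k = p + p * (k / p) := by
      have := Nat.div_add_mod k p
      omega
    rw [h2]
    simp
  calc it a ((p - k % p) % p + k) i
      = it a (((p - k % p) % p + k) % p) i := (it_mod n a hP hi _).symm
    _ = it a 0 i := by rw [h1]
    _ = i := rfl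

lemma orbit_it_eq (n : Int) (a : List Int) (hP : PermPre n a) {i : Int}
    (hi : 1 ≤ i ∧ i ≤ n) (k : Nat) : orbitF a (it a k i) = orbitF a i := by
  have hx : 1 ≤ it a k i ∧ it a k i ≤ n := it_bound n a hP hi k
  have hpx : per a (it a k i) = per a i := per_it n a hP hi k
  have hp := per_pos n a hP hi
  obtain ⟨l, hl, hli⟩ := i_mem_orbit_it n a hP hi k
  ext y
  rw [mem_orbit_iff, mem_orbit_iff]
  constructor
  · rintro ⟨m, hm, rfl⟩
    refine ⟨(m + k) % per a i, Nat.mod_lt _ hp, ?_⟩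
    rw [it_mod n a hP hi, it_add]
  · rintro ⟨m, hm, rfl⟩
    refine ⟨(m + l) % per a (it a k i), Nat.mod_lt _ (by omega), ?_⟩
    rw [it_mod n a hP hx, it_add, hli]

lemma orbit_eq_of_mem (n : Int) (a : List Int) (hP : PermPre n a) {i x : Int}
    (hi : 1 ≤ i ∧ i ≤ n) (hx : x ∈ orbitF a i) : orbitF a x = orbitF a i := by
  rw [mem_orbit_iff] at hx
  obtain ⟨k, -, rfl⟩ := hx
  exact orbit_it_eq n a hP hi k

lemma self_mem_orbit (n : Int) (a : List Int) (hP : PermPre n a) {i : Int}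
    (hi : 1 ≤ i ∧ i ≤ n) : i ∈ orbitF a i := by
  rw [mem_orbit_iff]
  exact ⟨0, per_pos n a hP hi, rfl⟩

lemma mem_Vm_iff (a : List Int) (m x : Int) :
    x ∈ Vm a m ↔ ∃ j : Int, 1 ≤ j ∧ j ≤ m - 1 ∧ x ∈ orbitF a j := by
  simp [Vm, Finset.mem_biUnion, Finset.mem_Icc, and_assoc]

lemma Vm_succ (a : List Int) (m : Int) (hm : 1 ≤ m) :
    Vm a (m + 1) = Vm a m ∪ orbitF a m := by
  have : Finset.Icc (1:Int) (m + 1 - 1) = insert m (Finset.Icc 1 (m - 1)) := by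
    rw [show m + 1 - 1 = m by ring]
    ext x; simp [Finset.mem_Icc]; omega
  rw [Vm, this, Finset.biUnion_insert, Finset.union_comm]
  rfl

lemma notVm_iff_min (n : Int) (a : List Int) (hP : PermPre n a) {i : Int}
    (hi : 1 ≤ i ∧ i ≤ n) :
    i ∉ Vm a i ↔ (∀ k < per a i, i ≤ it a k i) := by
  constructor
  · intro hni k hk
    by_contra hlt
    rw [not_le] at hlt
    have hb := it_bound n a hP hi k
    apply hni
    rw [mem_Vm_iff]
    refine ⟨it a k i, hb.1, by omega, ?_⟩
    obtain ⟨l, hl, hli⟩ := i_mem_orbit_it n a hP hi k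
    rw [mem_orbit_iff]
    exact ⟨l, by rw [per_it n a hP hi k]; exact hl, hli⟩
  · intro hmin hmem
    rw [mem_Vm_iff] at hmem
    obtain ⟨j, hj1, hj2, hj3⟩ := hmem
    have hjb : 1 ≤ j ∧ j ≤ n := ⟨hj1, by omega⟩
    have horb : orbitF a i = orbitF a j := orbit_eq_of_mem n a hP hjb hj3
    have hjmem : j ∈ orbitF a i := by
      rw [horb]; exact self_mem_orbit n a hP hjb
    rw [mem_orbit_iff] at hjmem
    obtain ⟨l, hl, hli⟩ := hjmem
    have := hmin l hl
    omega

lemma rep_get (n : Int) (vis : List Bool) (V : Finset Int) (hrep : VisRep n vis V)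
    {u : Int} (h0 : 0 ≤ u) (h1 : u ≤ n) :
    PySem.List.pyGet? vis u = some (decide (u ∈ V)) := by
  obtain ⟨hlen, hiff⟩ := hrep
  have hul : u.toNat < vis.length := by omega
  rw [PySem.List.pyGet?_of_nonneg vis h0, List.getElem?_eq_getElem hul]
  have hiu := hiff u.toNat hul
  rw [Int.toNat_of_nonneg h0] at hiu
  cases hb : vis[u.toNat] <;> rw [hb] at hiu <;> simp_all

lemma rep_set (n : Int) (vis : List Bool) (V : Finset Int) (hrep : VisRep n vis V)
    {u : Int} (h0 : 1 ≤ u) (_h1 : u ≤ n) :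
    VisRep n (PySem.List.pySetD vis u true) (insert u V) := by
  obtain ⟨hlen, hiff⟩ := hrep
  rw [PySem.List.pySetD_of_nonneg vis true (by omega)]
  refine ⟨by simp [hlen], ?_⟩
  intro j hj
  have hj' : j < vis.length := by simpa using hj
  rw [List.getElem_set]
  by_cases he : u.toNat = j
  · rw [if_pos he]
    have hje : (j : Int) = u := by omega
    simp [hje]
  · rw [if_neg he, hiff j hj']
    have hje : (j : Int) ≠ u := by omega
    simp [Finset.mem_insert, hje]

lemma walkA_spec (n : Int) (a : List Int) (hP : PermPre n a) {i : Int}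
    (hi : 1 ≤ i ∧ i ≤ n) (V : Finset Int)
    (hdisj : ∀ k, k < per a i → it a k i ∉ V) :
    ∀ (fuel k : Nat), k ≤ per a i → per a i - k < fuel →
      ∀ vis, VisRep n vis (V ∪ (Finset.range k).image (fun j => it a j i)) →
      ∃ vis', walkA a fuel vis (it a k i) (k : Int) = (vis', (per a i : Int)) ∧
        VisRep n vis' (V ∪ orbitF a i) := by
  intro fuel
  induction fuel with
  | zero => intro k _ hf; omega
  | succ fuel ih =>
    intro k hk hf vis hrep
    have hb := it_bound n a hP hi k
    have hget := rep_get n vis _ hrep (by omega) hb.2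
    rcases Nat.eq_or_lt_of_le hk with heq | hlt
    · subst heq
      have hmem : it a (per a i) i ∈
          V ∪ (Finset.range (per a i)).image (fun j => it a j i) := by
        rw [it_per n a hP hi]
        exact Finset.mem_union_right _
          (Finset.mem_image.mpr ⟨0, Finset.mem_range.mpr (per_pos n a hP hi), rfl⟩)
      rw [decide_eq_true hmem] at hget
      refine ⟨vis, ?_, by simpa [orbitF] using hrep⟩
      simp only [walkA]
      rw [hget]
    · have hnm : it a k i ∉ V ∪ (Finset.range k).image (fun j => it a j i) := by
        intro hmem
        rcases Finset.mem_union.mp hmem with h | h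
        · exact hdisj k hlt h
        · obtain ⟨j, hj, hje⟩ := Finset.mem_image.mp h
          rw [Finset.mem_range] at hj
          exact it_inj_lt n a hP hi hj hlt hje
      rw [decide_eq_false hnm] at hget
      have hrep2 : VisRep n (PySem.List.pySetD vis (it a k i) true)
          (V ∪ (Finset.range (k + 1)).image (fun j => it a j i)) := by
        rw [Finset.range_add_one, Finset.image_insert, Finset.union_insert]
        exact rep_set n vis _ hrep hb.1 hb.2
      obtain ⟨vis', hw, hrep'⟩ := ih (k + 1) (by omega) (by omega) _ hrep2
      refine ⟨vis', ?_, hrep'⟩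
      simp only [walkA]
      rw [hget]
      rw [show PySem.List.pyGetD a (it a k i) 0 = it a (k + 1) i from (it_succ a k i).symm,
        show (k : Int) + 1 = ((k + 1 : Nat) : Int) by push_cast; ring]
      exact hw

lemma loopA_spec (n : Int) (a : List Int) (hP : PermPre n a) :
    ∀ (K : Nat) (m : Int), 1 ≤ m → m ≤ n + 1 → (n + 1 - m).toNat = K →
      ∀ vis st, VisRep n vis (Vm a m) →
      ((PySem.List.pyRange m (n + 1) 1).foldl (stepA a (n.toNat + 1)) (vis, st)).2
        = (PySem.List.pyRange m (n + 1) 1).foldl (stepC a) st := by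
  intro K
  induction K with
  | zero =>
    intro m h1 h2 h3 vis st hrep
    rw [PySem.List.pyRange_one_eq_nil (by omega : n + 1 ≤ m)]
    simp
  | succ K ih =>
    intro m h1 h2 h3 vis st hrep
    have hmn : m < n + 1 := by omega
    rw [PySem.List.pyRange_one_cons hmn]
    simp only [List.foldl_cons]
    have hmb : 1 ≤ m ∧ m ≤ n := ⟨h1, by omega⟩
    have hget := rep_get n vis _ hrep (by omega) hmb.2
    by_cases hmem : m ∈ Vm a m
    · rw [decide_eq_true hmem] at hget
      have hstep : stepA a (n.toNat + 1) (vis, st) m = (vis, st) := by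
        simp only [stepA]
        rw [hget]
      have hstepC : stepC a st m = st := by
        rw [stepC, if_neg (fun hc => ((notVm_iff_min n a hP hmb).mpr hc) hmem)]
      rw [hstep, hstepC]
      have horb : orbitF a m ⊆ Vm a m := by
        rw [mem_Vm_iff] at hmem
        obtain ⟨j, hj1, hj2, hj3⟩ := hmem
        intro x hx
        rw [mem_Vm_iff]
        refine ⟨j, hj1, hj2, ?_⟩
        rw [← orbit_eq_of_mem n a hP ⟨hj1, by omega⟩ hj3]
        exact hx
      have hVm : Vm a (m + 1) = Vm a m := by
        rw [Vm_succ a m h1]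
        exact Finset.union_eq_left.mpr horb
      exact ih (m + 1) (by omega) (by omega) (by omega) vis st (hVm ▸ hrep)
    · rw [decide_eq_false hmem] at hget
      have hdisj : ∀ k, k < per a m → it a k m ∉ Vm a m := by
        intro k hk hin
        apply hmem
        rw [mem_Vm_iff] at hin
        obtain ⟨j, hj1, hj2, hj3⟩ := hin
        rw [mem_Vm_iff]
        refine ⟨j, hj1, hj2, ?_⟩
        rw [← orbit_eq_of_mem n a hP ⟨hj1, by omega⟩ hj3, orbit_it_eq n a hP hmb k]
        exact self_mem_orbit n a hP hmb
      have hrep0 : VisRep n vis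
          (Vm a m ∪ (Finset.range 0).image (fun j => it a j m)) := by
        simpa using hrep
      obtain ⟨vis', hw, hrep'⟩ := walkA_spec n a hP hmb (Vm a m) hdisj (n.toNat + 1) 0
        (by omega) (by have := per_le n a hP hmb; omega) vis hrep0
      have hw' : walkA a (n.toNat + 1) vis m 0 = (vis', ((per a m : Nat) : Int)) := by
        simpa using hw
      have hrep'' : VisRep n vis' (Vm a (m + 1)) := by
        rw [Vm_succ a m h1]
        exact hrep'
      have hguard : (∀ k < per a m, m ≤ it a k m) := (notVm_iff_min n a hP hmb).mp hmem
      have hstep : stepA a (n.toNat + 1) (vis, st) m =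
          (vis', stepC a st m) := by
        simp only [stepA]
        rw [hget, hw', stepC, if_pos hguard]
        by_cases hpar : PySem.Int.mod ((per a m : Nat) : Int) 2 = 1
        · rw [if_pos hpar, if_pos hpar]
        · rw [if_neg hpar, if_neg hpar]
      rw [hstep]
      exact ih (m + 1) (by omega) (by omega) (by omega) vis' (stepC a st m) hrep''

lemma pmin_one (a : List Int) (i : Int) : pmin a i 1 = i := by
  simp [pmin, it_zero]

lemma pmin_le (a : List Int) (i : Int) :
    ∀ (k j : Nat), j < k → pmin a i k ≤ it a j i := by
  intro k
  induction k with
  | zero => intro j hj; omega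
  | succ k ih =>
    intro j hj
    by_cases hj' : j = k
    · subst hj'
      simp only [pmin]
      split <;> omega
    · have h1 : pmin a i (k + 1) ≤ pmin a i k := by
        simp only [pmin]; split <;> omega
      exact le_trans h1 (ih j (by omega))

lemma pmin_mem (a : List Int) (i : Int) :
    ∀ k : Nat, 1 ≤ k → ∃ j, j < k ∧ pmin a i k = it a j i := by
  intro k
  induction k with
  | zero => intro h; omega
  | succ k ih =>
    intro _
    by_cases hk : k = 0
    · subst hk
      exact ⟨0, by omega, by rw [pmin_one, it_zero]⟩
    · simp only [pmin]
      split
      · exact ⟨k, by omega, rfl⟩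
      · obtain ⟨j, hj, he⟩ := ih (by omega)
        exact ⟨j, by omega, he⟩

lemma pmin_per_eq_iff (n : Int) (a : List Int) (hP : PermPre n a) {i : Int}
    (hi : 1 ≤ i ∧ i ≤ n) :
    pmin a i (per a i) = i ↔ (∀ k < per a i, i ≤ it a k i) := by
  have hp := per_pos n a hP hi
  constructor
  · intro h k hk
    have := pmin_le a i (per a i) k hk
    rw [h] at this
    exact this
  · intro hmin
    obtain ⟨j, hj, he⟩ := pmin_mem a i (per a i) (by omega)
    have h1 : i ≤ pmin a i (per a i) := he ▸ hmin j hj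
    have h2 : pmin a i (per a i) ≤ it a 0 i := pmin_le a i _ 0 (by omega)
    rw [it_zero] at h2
    omega

lemma walkB_spec (n : Int) (a : List Int) (hP : PermPre n a) {i : Int}
    (hi : 1 ≤ i ∧ i ≤ n) :
    ∀ (fuel k : Nat), 1 ≤ k → k ≤ per a i → per a i - k < fuel →
      walkB a fuel i (it a k i) (k : Int) (pmin a i k) =
        some ((per a i : Int), pmin a i (per a i)) := by
  intro fuel
  induction fuel with
  | zero => intro k _ _ hf; omega
  | succ fuel ih =>
    intro k hk1 hk2 hf
    rcases Nat.eq_or_lt_of_le hk2 with heq | hlt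
    · subst heq
      simp only [walkB]
      rw [it_per n a hP hi, if_pos rfl]
    · have hne : it a k i ≠ i := it_ne_of_lt_per n a hP hi (by omega) hlt
      simp only [walkB]
      rw [if_neg hne,
        show PySem.List.pyGetD a (it a k i) 0 = it a (k + 1) i from (it_succ a k i).symm,
        show (k : Int) + 1 = ((k + 1 : Nat) : Int) by push_cast; ring,
        show (if it a k i < pmin a i k then it a k i else pmin a i k) = pmin a i (k + 1)
          from rfl]
      exact ih (k + 1) (by omega) hlt (by omega)

lemma stepB_eq_stepC (n : Int) (a : List Int) (hP : PermPre n a) {i : Int}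
    (hi : 1 ≤ i ∧ i ≤ n) (st : List Int × List Int) :
    stepB a (n.toNat + 1) st i = stepC a st i := by
  have hp := per_pos n a hP hi
  have hle := per_le n a hP hi
  have hw := walkB_spec n a hP hi (n.toNat + 1) 1 le_rfl (by omega) (by omega)
  rw [show it a 1 i = PySem.List.pyGetD a i 0 from rfl, pmin_one] at hw
  have hw' : walkB a (n.toNat + 1) i (PySem.List.pyGetD a i 0) 1 i =
      some ((per a i : Int), pmin a i (per a i)) := by
    simpa using hw
  simp only [stepB, hw']
  by_cases hm : pmin a i (per a i) = i
  · rw [if_pos hm, stepC, if_pos ((pmin_per_eq_iff n a hP hi).mp hm)]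
  · rw [if_neg hm, stepC, if_neg (fun hg => hm ((pmin_per_eq_iff n a hP hi).mpr hg))]

lemma mod_pos_MOD : (0 : Int) < MOD := by decide

lemma mod_mod_MOD (x : Int) : PySem.Int.mod (PySem.Int.mod x MOD) MOD = PySem.Int.mod x MOD := by
  simp only [PySem.Int.mod_eq_emod_of_pos mod_pos_MOD]
  exact Int.emod_emod_of_dvd _ dvd_rfl

lemma foldl_mod_eq (g : Int → Int) :
    ∀ (e : List Int) (s : Int),
      e.foldl (fun s L => PySem.Int.mod (s + g L) MOD) (PySem.Int.mod s MOD)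
        = PySem.Int.mod (s + (e.map g).sum) MOD := by
  intro e
  induction e with
  | nil => intro s; simp
  | cons x t ih =>
    intro s
    simp only [List.foldl_cons, List.map_cons, List.sum_cons]
    have hstep : PySem.Int.mod (PySem.Int.mod s MOD + g x) MOD
        = PySem.Int.mod (s + g x) MOD := by
      simp only [PySem.Int.mod_eq_emod_of_pos mod_pos_MOD]
      rw [Int.add_emod, Int.emod_emod_of_dvd _ dvd_rfl, ← Int.add_emod]
    rw [hstep, ih (s + g x), add_assoc]

lemma sumf2_eq (e : List Int) :
    e.foldl (fun s L => PySem.Int.mod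
        (s + (PySem.Int.floordiv L 4 * L +
          (if PySem.Int.mod L 4 = 2 then PySem.Int.floordiv L 2 else 0))) MOD) 0
      = PySem.Int.mod ((e.map (fun L => PySem.Int.floordiv L 4 * L +
          (if PySem.Int.mod L 4 = 2 then PySem.Int.floordiv L 2 else 0))).sum) MOD := by
  have h0 : (0 : Int) = PySem.Int.mod 0 MOD := by
    simp [PySem.Int.mod_eq_emod_of_pos mod_pos_MOD]
  rw [h0, foldl_mod_eq, zero_add]

lemma finish_eq (o e : List Int) : finishA o e = finishB o e := by
  match o with
  | [] =>
    simp only [finishA, finishB, PySem.List.len_eq, List.length_nil]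
    rw [if_neg (by norm_num : ¬((0:Nat):Int) = 2), if_neg (by norm_num : ¬((0:Nat):Int) = 2),
      if_neg (by norm_num : ¬(((0:Nat):Int) ≠ 0)), if_pos (by norm_num : ((0:Nat):Int) = 0),
      zero_add, sumf2_eq]
  | [x] =>
    simp only [finishA, finishB, PySem.List.len_eq, List.length_cons, List.length_nil]
    rw [if_neg (by norm_num : ¬((0+1:Nat):Int) = 2), if_neg (by norm_num : ¬((0+1:Nat):Int) = 2),
      if_neg (by norm_num : ¬((0+1:Nat):Int) = 0), if_pos (by norm_num : ((0+1:Nat):Int) ≠ 0)]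
  | [x, y] =>
    simp only [finishA, finishB, PySem.List.len_eq, List.length_cons, List.length_nil]
    rw [if_pos (by norm_num : ((0+1+1:Nat):Int) = 2), if_pos (by norm_num : ((0+1+1:Nat):Int) = 2),
      if_neg (by norm_num : ¬((0+1+1:Nat):Int) = 0), zero_add, mod_mod_MOD]
  | x :: y :: z :: t =>
    simp only [finishA, finishB, PySem.List.len_eq, List.length_cons]
    have h0 : ¬((t.length + 1 + 1 + 1 : Nat) : Int) = 0 := by push_cast; omega
    have h2 : ¬((t.length + 1 + 1 + 1 : Nat) : Int) = 2 := by push_cast; omega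
    rw [if_neg h0, if_neg h2, if_neg h2, if_pos h0]

-- ===== VERDICT (by name: the statement is the Claim_ definition above) =====
theorem solve_spec : Claim_equal_solve := by
  intro n a hD hP
  unfold Spec_solve
  rcases hP with hn0 | hP
  · -- n ≤ 0: both ranges are empty and both sides reduce to the empty tail
    simp only [solve, solve_alt]
    rw [PySem.List.pyRange_one_eq_nil (by omega : n + 1 ≤ 1)]
    exact finish_eq [] []
  have hn : 0 ≤ n := by have := hP.1; omega
  simp only [solve, solve_alt]
  have hB : (PySem.List.pyRange 1 (n + 1) 1).foldl (stepB a (n.toNat + 1)) ([], []) =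
      (PySem.List.pyRange 1 (n + 1) 1).foldl (stepC a) ([], []) := by
    apply PySem.List.foldl_congr_mem
    intro acc x hx
    rw [PySem.List.mem_pyRange_one] at hx
    exact stepB_eq_stepC n a hP ⟨hx.1, by omega⟩ acc
  have hrep1 : VisRep n (List.replicate (n + 1).toNat false) (Vm a 1) := by
    refine ⟨by simp [List.length_replicate]; omega, ?_⟩
    intro j hj
    simp only [List.getElem_replicate]
    constructor
    · intro h; simp at h
    · intro h
      exfalso
      rw [mem_Vm_iff] at h
      obtain ⟨jj, h1, h2, -⟩ := h
      omega
  have hA := loopA_spec n a hP (n + 1 - 1).toNat 1 (by omega) (by omega) rfl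
      (List.replicate (n + 1).toNat false) ([], []) hrep1
  rw [hB, hA]
  exact finish_eq _ _
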